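-- pv_equiv track=rewrite | github.com/DigiZiggy/Python | EX14B/it.py | interlude
-- ===== SOURCE A (Python) =====
-- def interlude(row, col):
--     """
--     Find what you search.
--
--     :param row:
--     :param col:
--     :return:
--     """
--     rows = 0
--     cols = 0
--     if row < 1 or col < 1:
--         return None
--     another_one = row
--     while another_one > 0:
--         rows += another_one
--         another_one -= 1
--     col -= 2
--     while col >= 0:
--         cols += col + row
--         col -= 1
--     return cols + rows
-- ===== SOURCE B (Python) =====
-- def interlude(row, col):
--     if row < 1 or col < 1:
--         return None
--     return row * (row + 1) // 2 + (col - 1) * (col - 2) // 2 + row * (col - 1)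
-- ===== Notes on version B (the rewrite author's own statement) =====
-- stated objective: faster
-- what changed: Replaces the two decrementing while-loop accumulations with the closed-form arithmetic-series formulas row*(row+1)//2 and (col-1)*(col-2)//2 + row*(col-1).
import Mathlib
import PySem

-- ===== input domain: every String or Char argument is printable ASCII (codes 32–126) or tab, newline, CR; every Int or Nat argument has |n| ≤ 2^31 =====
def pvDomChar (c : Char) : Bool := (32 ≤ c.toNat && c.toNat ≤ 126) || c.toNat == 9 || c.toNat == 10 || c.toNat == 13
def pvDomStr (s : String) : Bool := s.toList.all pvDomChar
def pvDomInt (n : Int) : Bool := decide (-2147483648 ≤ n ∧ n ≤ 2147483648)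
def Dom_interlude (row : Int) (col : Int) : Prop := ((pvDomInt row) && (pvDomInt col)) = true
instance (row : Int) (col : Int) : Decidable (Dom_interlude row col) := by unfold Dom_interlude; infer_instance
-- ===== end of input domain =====

-- B replaces A's two counting loops by the closed-form arithmetic-series formulas (objective: faster, O(1) vs O(row+col)).

-- ===== PORT A =====
-- 'while another_one > 0: rows += another_one; another_one -= 1'
def rowsLoop (a acc : Int) : Int :=
  if a > 0 then rowsLoop (a - 1) (acc + a) else acc
termination_by a.toNat
decreasing_by omega

-- 'while col >= 0: cols += col + row; col -= 1'
def colsLoop (c row acc : Int) : Int :=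
  if c ≥ 0 then colsLoop (c - 1) row (acc + (c + row)) else acc
termination_by (c + 1).toNat
decreasing_by omega

def interlude (row : Int) (col : Int) : Option Int :=
  if row < 1 ∨ col < 1 then none
  else some (colsLoop (col - 2) row 0 + rowsLoop row 0)

-- ===== PORT B =====
def interlude_alt (row : Int) (col : Int) : Option Int :=
  if row < 1 ∨ col < 1 then none
  else some (PySem.Int.floordiv (row * (row + 1)) 2
             + PySem.Int.floordiv ((col - 1) * (col - 2)) 2
             + row * (col - 1))

-- ===== PRECONDITION & SPEC =====
def Spec_interlude (row : Int) (col : Int) (out : Option Int) : Prop := out = interlude_alt row col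
instance (row : Int) (col : Int) (out : Option Int) : Decidable (Spec_interlude row col out) := by unfold Spec_interlude; infer_instance

-- ===== CLAIM (what is proved, stated in full; the proofs are below) =====
def Claim_equal_interlude : Prop := ∀ (row : Int) (col : Int), Dom_interlude row col → Spec_interlude row col (interlude row col)

-- ===== LEMMAS AND PROOFS =====

theorem rowsLoop_eq (a acc : Int) (h : 0 ≤ a) : 2 * rowsLoop a acc = 2 * acc + a * (a + 1) := by
  induction a, acc using rowsLoop.induct with
  | case1 a acc hpos ih =>
      rw [rowsLoop, if_pos hpos, ih (by omega)]
      ring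
  | case2 a acc hneg =>
      rw [rowsLoop, if_neg hneg]
      have : a = 0 := by omega
      subst this; ring

theorem colsLoop_eq (row : Int) (n : Nat) : ∀ (c acc : Int), -1 ≤ c → (c + 1).toNat = n →
    2 * colsLoop c row acc = 2 * acc + c * (c + 1) + 2 * (c + 1) * row := by
  induction n with
  | zero =>
      intro c acc h hn
      have : c = -1 := by omega
      subst this
      rw [colsLoop, if_neg (by norm_num)]
      ring
  | succ n ih =>
      intro c acc h hn
      have hpos : c ≥ 0 := by omega
      rw [colsLoop, if_pos hpos, ih (c - 1) (acc + (c + row)) (by omega) (by omega)]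
      ring

theorem half_floordiv (x y : Int) (h : 2 * x = y) : PySem.Int.floordiv y 2 = x := by
  rw [PySem.Int.floordiv_eq_iff_of_pos (by norm_num)]
  omega

-- ===== VERDICT (by name: the statement is the Claim_ definition above) =====
theorem interlude_spec : Claim_equal_interlude := by
  intro row col _
  unfold Spec_interlude interlude interlude_alt
  by_cases hb : row < 1 ∨ col < 1
  · simp [hb]
  · push Not at hb
    obtain ⟨hr, hc⟩ := hb
    rw [if_neg (by omega), if_neg (by omega)]
    have h1 : PySem.Int.floordiv (row * (row + 1)) 2 = rowsLoop row 0 := by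
      apply half_floordiv
      rw [rowsLoop_eq row 0 (by omega)]; ring
    have h2 : PySem.Int.floordiv ((col - 1) * (col - 2)) 2
        = colsLoop (col - 2) row 0 - row * (col - 1) := by
      apply half_floordiv
      have := colsLoop_eq row ((col - 2) + 1).toNat (col - 2) 0 (by omega) rfl
      rw [mul_sub, this]; ring
    rw [h1, h2]; ring_nf
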